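-- pv_equiv track=rewrite | github.com/kazi-md-al-wakil/CSE422-Notes | Assignments/Lab Assignment 2/8_19301051_kazimdalwakil_cse422_lab_2 (Right Code).py | prochurFitnessCalculator
-- ===== SOURCE A (Python) =====
-- def prochurFitnessCalculator(iqx_playerRun, iqx_chromosome):
--   whoIsFitEnough = [] # iqx_chromosome er sob sample er run ekhane store hobe. nested list
--   SumOfIndividualList = [] # whoIsFitEnough List er moddhe sob sample er sum ber kore ei list e append korbo
--   for itor in iqx_chromosome: #fetching sample from iqx_chromosome
--     tempuLisu = []
--     for jtor, uporerI in zip(iqx_playerRun, itor): #gun kortesi run list er sathe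
--       tempuLisu.append(jtor*uporerI) #[68, 25, 70, 53, 71, 55, 66, 29] * [0, 0, 0, 0, 1, 0, 1, 0]
--     whoIsFitEnough.append(tempuLisu) # appending this [0, 0, 0, 0, 71, 0, 66, 0]
--   for itor in whoIsFitEnough:
--     SumOfIndividualList.append(sum(itor)) # Sum of [0, 0, 0, 0, 71, 0, 66, 0] = 137 # appending 137 to the SumOfList1 list
--
--
--
--   return SumOfIndividualList
-- ===== SOURCE B (Python) =====
-- def prochurFitnessCalculator(iqx_playerRun, iqx_chromosome):
--     # Column sweep: walk the run list once, column by column, and add each run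
--     # value's contribution into a running total per chromosome (transposed
--     # traversal; no nested products table, no per-row second pass). Columns
--     # beyond the longest chromosome contribute nothing, so stop there.
--     m = max((len(c) for c in iqx_chromosome), default=0)
--     totals = [0] * len(iqx_chromosome)
--     for j, r in enumerate(iqx_playerRun[:m]):
--         for i, chrom in enumerate(iqx_chromosome):
--             if j < len(chrom):
--                 totals[i] += r * chrom[j]
--     return totals
-- ===== Notes on version B (the rewrite author's own statement) =====
-- stated objective: alternative
-- what changed: Transposed traversal: instead of A's two phases (build a nested element-wise products table per chromosome, then sum each row), B sweeps the run list column by column, accumulating each run value's contribution into a per-chromosome running-total array; no intermediate nested list and no second pass exist.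
import Mathlib
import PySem

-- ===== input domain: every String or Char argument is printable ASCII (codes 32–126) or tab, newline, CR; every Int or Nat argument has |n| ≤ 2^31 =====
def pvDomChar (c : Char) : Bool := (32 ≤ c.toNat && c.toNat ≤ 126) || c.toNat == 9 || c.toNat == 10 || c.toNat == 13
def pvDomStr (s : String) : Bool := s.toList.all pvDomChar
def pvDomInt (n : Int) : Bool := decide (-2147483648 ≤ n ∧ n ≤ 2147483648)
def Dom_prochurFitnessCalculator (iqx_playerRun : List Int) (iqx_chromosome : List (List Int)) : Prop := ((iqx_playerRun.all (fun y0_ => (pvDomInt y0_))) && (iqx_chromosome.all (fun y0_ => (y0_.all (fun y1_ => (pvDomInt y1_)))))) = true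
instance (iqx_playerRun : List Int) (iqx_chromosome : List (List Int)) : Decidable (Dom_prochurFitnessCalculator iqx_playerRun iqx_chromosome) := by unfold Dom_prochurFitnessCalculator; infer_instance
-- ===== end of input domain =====

-- B replaces A's two phases (nested products table, then row sums) by a transposed
-- column sweep accumulating into per-chromosome running totals (objective: alternative).

-- ===== PORT A =====
-- first loop: build nested products table whoIsFitEnough; second loop: sum each row
def prochurFitnessCalculator (iqx_playerRun : List Int) (iqx_chromosome : List (List Int)) : List Int :=
  let whoIsFitEnough : List (List Int) :=
    iqx_chromosome.foldl (fun acc itor =>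
      acc ++ [(iqx_playerRun.zip itor).foldl (fun tempuLisu p => tempuLisu ++ [p.1 * p.2]) []]) []
  whoIsFitEnough.foldl (fun s itor => s ++ [itor.foldl (fun a x => a + x) 0]) []

-- ===== PORT B =====
-- column sweep: m = longest chromosome; for each (j, r) in enumerate(playerRun[:m]),
-- add r * chrom[j] into totals[i] for every chromosome i whose length exceeds j
-- (the totals[i] update is rendered as a map over totals zipped with the chromosome list)
def prochurFitnessCalculator_alt (iqx_playerRun : List Int) (iqx_chromosome : List (List Int)) : List Int :=
  (PySem.List.enumerate
      (PySem.List.slice iqx_playerRun none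
        (some (PySem.List.maxD (iqx_chromosome.map (fun c => ((c.length : Int)))) id 0))) 0).foldl
    (fun totals p =>
      (totals.zip iqx_chromosome).map (fun q =>
        if p.1 < (q.2.length : Int) then q.1 + p.2 * PySem.List.pyGetD q.2 p.1 0 else q.1))
    (List.replicate iqx_chromosome.length 0)

-- ===== PRECONDITION & SPEC =====
def Spec_prochurFitnessCalculator (iqx_playerRun : List Int) (iqx_chromosome : List (List Int)) (out : List Int) : Prop := out = prochurFitnessCalculator_alt iqx_playerRun iqx_chromosome
instance (iqx_playerRun : List Int) (iqx_chromosome : List (List Int)) (out : List Int) : Decidable (Spec_prochurFitnessCalculator iqx_playerRun iqx_chromosome out) := by unfold Spec_prochurFitnessCalculator; infer_instance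

-- ===== CLAIM (what is proved, stated in full; the proofs are below) =====
def Claim_equal_prochurFitnessCalculator : Prop := ∀ (iqx_playerRun : List Int) (iqx_chromosome : List (List Int)), Dom_prochurFitnessCalculator iqx_playerRun iqx_chromosome → Spec_prochurFitnessCalculator iqx_playerRun iqx_chromosome (prochurFitnessCalculator iqx_playerRun iqx_chromosome)

-- ===== LEMMAS AND PROOFS =====

-- dot product, the common value both sides compute per chromosome
def pvDot (r c : List Int) : Int := ((r.zip c).map (fun p => p.1 * p.2)).sum

theorem pvDot_nil (c : List Int) : pvDot [] c = 0 := by simp [pvDot]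

theorem pvDot_nil_right (r : List Int) : pvDot r [] = 0 := by simp [pvDot]

theorem pvDot_cons (x g : Int) (rs cs : List Int) :
    pvDot (x :: rs) (g :: cs) = x * g + pvDot rs cs := by simp [pvDot]

-- A computes the per-row dot products
theorem pvA_eq_map (pr : List Int) (ch : List (List Int)) :
    prochurFitnessCalculator pr ch = ch.map (fun c => pvDot pr c) := by
  unfold prochurFitnessCalculator
  rw [PySem.List.foldl_append_singleton_eq_map, PySem.List.foldl_append_singleton_eq_map]
  simp only [List.nil_append, List.map_map]
  refine List.map_congr_left (fun c _ => ?_)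
  simp only [Function.comp]
  rw [PySem.List.foldl_append_singleton_eq_map, List.nil_append]
  simp only [pvDot]
  exact List.sum_eq_foldl.symm

-- fusing two map-over-zip passes that keep the second component fixed
theorem pv_zip_map_zip (f g : Int → List Int → Int) :
    ∀ (ts : List Int) (ch : List (List Int)),
      (((ts.zip ch).map (fun p => f p.1 p.2)).zip ch).map (fun p => g p.1 p.2)
        = (ts.zip ch).map (fun p => g (f p.1 p.2) p.2)
  | [], _ => by simp
  | _ :: _, [] => by simp
  | t :: ts, c :: cs => by
      simp only [List.zip_cons_cons, List.map_cons]
      exact congrArg _ (pv_zip_map_zip f g ts cs)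

-- one column step followed by the dot product of the tail equals the dot of the whole
theorem pv_elem_step (r : Int) (rs : List Int) (s : Int) (hs : 0 ≤ s) (t : Int) (c : List Int) :
    (if s < (c.length : Int) then t + r * PySem.List.pyGetD c s 0 else t)
      + pvDot rs (c.drop (s + 1).toNat)
      = t + pvDot (r :: rs) (c.drop s.toNat) := by
  have hst : (s + 1).toNat = s.toNat + 1 := by omega
  by_cases h : s < (c.length : Int)
  · have hlt : s.toNat < c.length := by omega
    rw [if_pos h, PySem.List.pyGetD_eq_getElem c 0 hs h,
        List.drop_eq_getElem_cons hlt, pvDot_cons, hst]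
    ring
  · have hge : c.length ≤ s.toNat := by omega
    rw [if_neg h, List.drop_eq_nil_of_le hge, List.drop_eq_nil_of_le (by omega),
        pvDot_nil_right, pvDot_nil_right]

-- the column loop invariant: folding the enumerated run list from index s adds,
-- to each running total, the dot product with the chromosome's tail from s
theorem pv_colloop (ch : List (List Int)) :
    ∀ (pr : List Int) (s : Int) (ts : List Int), 0 ≤ s → ts.length ≤ ch.length →
      (PySem.List.enumerate pr s).foldl
        (fun totals p =>
          (totals.zip ch).map (fun q =>
            if p.1 < (q.2.length : Int) then q.1 + p.2 * PySem.List.pyGetD q.2 p.1 0 else q.1))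
        ts
      = (ts.zip ch).map (fun p => p.1 + pvDot pr (p.2.drop s.toNat))
  | [], s, ts, _, hlen => by
      simp only [PySem.List.enumerate_nil, List.foldl_nil, pvDot_nil, add_zero]
      exact (List.map_fst_zip hlen).symm
  | r :: rs, s, ts, hs, hlen => by
      rw [PySem.List.enumerate_cons, List.foldl_cons]
      rw [pv_colloop ch rs (s + 1) _ (by omega)
            (by rw [List.length_map, List.length_zip]; omega)]
      rw [pv_zip_map_zip
            (fun t c => if s < (c.length : Int) then t + r * PySem.List.pyGetD c s 0 else t)
            (fun t c => t + pvDot rs (c.drop (s + 1).toNat))]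
      exact List.map_congr_left (fun p _ => pv_elem_step r rs s hs p.1 p.2)

-- seeding the totals with zeros yields exactly the list of dot products
theorem pv_seed (pr : List Int) :
    ∀ (ch : List (List Int)),
      ((List.replicate ch.length (0 : Int)).zip ch).map (fun p => p.1 + pvDot pr (p.2.drop 0))
        = ch.map (fun c => pvDot pr c)
  | [] => by simp
  | c :: cs => by
      simp only [List.length_cons, List.replicate_succ, List.zip_cons_cons, List.map_cons,
        List.drop_zero, zero_add]
      exact congrArg _ (pv_seed pr cs)

-- the column cap m is nonnegative and bounds every chromosome's length
theorem pv_m_nonneg (ch : List (List Int)) :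
    0 ≤ PySem.List.maxD (ch.map (fun c => ((c.length : Int)))) id 0 := by
  unfold PySem.List.maxD
  cases h : PySem.List.max? (ch.map (fun c => ((c.length : Int)))) id with
  | none => simp
  | some x =>
      have hx := PySem.List.max?_mem h
      simp only [List.mem_map] at hx
      obtain ⟨c, _, rfl⟩ := hx
      simp

theorem pv_m_ge (ch : List (List Int)) (c : List Int) (hc : c ∈ ch) :
    (c.length : Int) ≤ PySem.List.maxD (ch.map (fun c => ((c.length : Int)))) id 0 := by
  unfold PySem.List.maxD
  cases h : PySem.List.max? (ch.map (fun c => ((c.length : Int)))) id with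
  | none =>
      rw [PySem.List.max?_eq_none_iff, List.map_eq_nil_iff] at h
      subst h
      exact absurd hc (by simp)
  | some x =>
      exact PySem.List.max?_isMax h _ (List.mem_map_of_mem hc)

-- truncating the run list at (or past) the chromosome's length keeps the dot product
theorem pvDot_take : ∀ (c pr : List Int) (m : Nat), c.length ≤ m →
    pvDot (pr.take m) c = pvDot pr c
  | [], pr, m, _ => by rw [pvDot_nil_right, pvDot_nil_right]
  | _ :: _, [], _, _ => by rw [List.take_nil]
  | g :: cs, r :: rs, m + 1, h => by
      simp only [List.take_succ_cons, pvDot_cons]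
      rw [pvDot_take cs rs m (by simpa using h)]

theorem pvB_eq_map (pr : List Int) (ch : List (List Int)) :
    prochurFitnessCalculator_alt pr ch = ch.map (fun c => pvDot pr c) := by
  unfold prochurFitnessCalculator_alt
  rw [PySem.List.slice_to pr (pv_m_nonneg ch)]
  rw [pv_colloop ch _ 0 (List.replicate ch.length 0) le_rfl (by simp)]
  simp only [Int.toNat_zero]
  rw [pv_seed]
  refine List.map_congr_left (fun c hc => ?_)
  refine pvDot_take c pr _ ?_
  have h1 := pv_m_ge ch c hc
  have h0 := pv_m_nonneg ch
  omega

-- ===== VERDICT (by name: the statement is the Claim_ definition above) =====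
theorem prochurFitnessCalculator_spec : Claim_equal_prochurFitnessCalculator := by
  intro pr ch _
  unfold Spec_prochurFitnessCalculator
  rw [pvA_eq_map, pvB_eq_map]
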